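-- pv_equiv track=rewrite | github.com/MrKand1/Mod7 | colorref.py | get_part_sizes
-- ===== SOURCE A (Python) =====
-- def get_part_sizes(graph_idx, colors, offsets, graph_sizes):
--     base = offsets[graph_idx]
--     size = graph_sizes[graph_idx]
--     if size == 0:
--         return ()
--     counts = {}
--     for i in range(size):
--         color = colors[base+i]
--         if color not in counts:
--             counts[color] = 0
--         counts[color] += 1
--     return tuple(sorted(counts.values()))
-- ===== SOURCE B (Python) =====
-- def get_part_sizes(graph_idx, colors, offsets, graph_sizes):
--     base = offsets[graph_idx]
--     size = graph_sizes[graph_idx]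
--     part = sorted(colors[base + i] for i in range(size))
--     sizes = []
--     prev = None
--     run = 0
--     for c in part:
--         if run > 0 and c == prev:
--             run += 1
--         else:
--             if run > 0:
--                 sizes.append(run)
--             prev = c
--             run = 1
--     if run > 0:
--         sizes.append(run)
--     return tuple(sorted(sizes))
-- ===== Notes on version B (the rewrite author's own statement) =====
-- stated objective: alternative
-- what changed: Replaces A's dict-based frequency counting of the slice by sorting the fetched block once and counting run lengths of equal neighbours in a single scan.
import Mathlib
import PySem

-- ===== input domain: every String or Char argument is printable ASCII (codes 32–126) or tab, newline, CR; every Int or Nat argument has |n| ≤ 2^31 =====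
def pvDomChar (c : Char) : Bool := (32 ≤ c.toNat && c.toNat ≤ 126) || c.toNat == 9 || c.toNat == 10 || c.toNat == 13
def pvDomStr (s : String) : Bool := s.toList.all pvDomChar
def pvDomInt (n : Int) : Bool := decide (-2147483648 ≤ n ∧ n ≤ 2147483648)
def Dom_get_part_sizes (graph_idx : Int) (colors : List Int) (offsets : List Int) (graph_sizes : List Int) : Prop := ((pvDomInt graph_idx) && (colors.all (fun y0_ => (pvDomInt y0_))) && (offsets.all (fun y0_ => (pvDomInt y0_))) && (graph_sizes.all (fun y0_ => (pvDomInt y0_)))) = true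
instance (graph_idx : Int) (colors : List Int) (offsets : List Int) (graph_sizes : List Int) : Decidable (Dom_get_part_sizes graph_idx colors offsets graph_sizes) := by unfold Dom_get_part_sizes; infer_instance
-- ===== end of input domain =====

-- B replaces A's dict-based frequency counting by sorting the slice and counting run lengths in one scan (alternative algorithm, similar cost).


-- ===== PORT A =====
def get_part_sizes (graph_idx : Int) (colors : List Int) (offsets : List Int) (graph_sizes : List Int) : List Int :=
  match PySem.List.pyGet? offsets graph_idx, PySem.List.pyGet? graph_sizes graph_idx with
  | some base, some size =>
    if size = 0 then []
    else
      let counts := (PySem.List.pyRange 0 size 1).foldl (fun d i =>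
        match PySem.List.pyGet? colors (base + i) with
        | some color =>
          let d := if d.contains color then d else d.insert color (0 : Int)
          d.insert color (d.getD color 0 + 1)
        | none => d) PySem.Dict.empty  -- IndexError (none) outside Pre_; then the loop state is just kept
      PySem.List.sorted counts.values (fun x => x) false
  | _, _ => []  -- IndexError on offsets/graph_sizes, outside Pre_

-- ===== PORT B =====
def get_part_sizes_alt (graph_idx : Int) (colors : List Int) (offsets : List Int) (graph_sizes : List Int) : List Int :=
  match PySem.List.pyGet? offsets graph_idx with
  | none => []
  | some base =>
    match PySem.List.pyGet? graph_sizes graph_idx with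
    | none => []
    | some size =>
      -- filterMap: an IndexError on colors (none) lies outside Pre_
      let part := PySem.List.sorted ((PySem.List.pyRange 0 size 1).filterMap
          (fun i => PySem.List.pyGet? colors (base + i))) (fun x => x) false
      let st := part.foldl (fun (st : List Int × Int × Option Int) c =>
          if 0 < st.2.1 ∧ st.2.2 = some c then (st.1, st.2.1 + 1, st.2.2)
          else ((if 0 < st.2.1 then st.1 ++ [st.2.1] else st.1), 1, some c))
        (([] : List Int), (0 : Int), (none : Option Int))
      let sizes := if 0 < st.2.1 then st.1 ++ [st.2.1] else st.1
      PySem.List.sorted sizes (fun x => x) false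

-- ===== PRECONDITION & SPEC =====
-- Pre_: exactly the inputs where Python A returns (valid graph_idx for offsets/graph_sizes, and
-- either a non-positive size or the whole indexed block inside colors' Python index range).
def Pre_get_part_sizes (graph_idx : Int) (colors : List Int) (offsets : List Int) (graph_sizes : List Int) : Prop :=
  (PySem.List.pyGet? offsets graph_idx).isSome = true ∧
  (PySem.List.pyGet? graph_sizes graph_idx).isSome = true ∧
  (let base := (PySem.List.pyGet? offsets graph_idx).getD 0
   let size := (PySem.List.pyGet? graph_sizes graph_idx).getD 0
   size ≤ 0 ∨ (-(colors.length : Int) ≤ base ∧ base + size ≤ (colors.length : Int)))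
instance (graph_idx : Int) (colors : List Int) (offsets : List Int) (graph_sizes : List Int) : Decidable (Pre_get_part_sizes graph_idx colors offsets graph_sizes) := by unfold Pre_get_part_sizes; infer_instance

def pvWitness_get_part_sizes : Int × List Int × List Int × List Int := (0, [5, 5, 7], [0], [3])

def Spec_get_part_sizes (graph_idx : Int) (colors : List Int) (offsets : List Int) (graph_sizes : List Int) (out : List Int) : Prop := out = get_part_sizes_alt graph_idx colors offsets graph_sizes
instance (graph_idx : Int) (colors : List Int) (offsets : List Int) (graph_sizes : List Int) (out : List Int) : Decidable (Spec_get_part_sizes graph_idx colors offsets graph_sizes out) := by unfold Spec_get_part_sizes; infer_instance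

-- ===== CLAIM (what is proved, stated in full; the proofs are below) =====
def Claim_equal_get_part_sizes : Prop := ∀ (graph_idx : Int) (colors : List Int) (offsets : List Int) (graph_sizes : List Int), Dom_get_part_sizes graph_idx colors offsets graph_sizes → Pre_get_part_sizes graph_idx colors offsets graph_sizes → Spec_get_part_sizes graph_idx colors offsets graph_sizes (get_part_sizes graph_idx colors offsets graph_sizes)

-- ===== LEMMAS AND PROOFS =====

-- fold with a skip-on-none match = fold over the filterMap, when every lookup is some
theorem foldl_match_eq_filterMap {β : Type} (f : β → Int → β) (g : Int → Option Int) :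
    ∀ (idxs : List Int), (∀ i ∈ idxs, (g i).isSome) → ∀ (init : β),
    idxs.foldl (fun d i => match g i with | some c => f d c | none => d) init
      = (idxs.filterMap g).foldl f init := by
  intro idxs
  induction idxs with
  | nil => intro _ init; simp
  | cons x xs ih =>
    intro h init
    obtain ⟨c, hc⟩ := Option.isSome_iff_exists.mp (h x (by simp))
    simp only [List.foldl_cons, List.filterMap_cons, hc]
    exact ih (fun i hi => h i (by simp [hi])) (f init c)

-- A's loop body is the standard counter step
theorem stepA_eq (d : PySem.Dict Int Int) (c : Int) :
    (let d' := if d.contains c then d else d.insert c (0 : Int)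
     d'.insert c (d'.getD c 0 + 1)) = d.insert c (d.getD c 0 + 1) := by
  by_cases h : d.contains c
  · simp [h]
  · simp only [Bool.not_eq_true] at h
    simp [h, PySem.Dict.getD_insert_self, PySem.Dict.insert_insert_self,
      PySem.Dict.getD_of_not_contains]

-- run-length scan, recursively
def contRuns (p k : Int) : List Int → List Int
  | [] => [k]
  | x :: xs => if x = p then contRuns p (k + 1) xs else k :: contRuns x 1 xs

-- first-occurrence dedup, structurally
def dedupF : List Int → List Int
  | [] => []
  | x :: xs => x :: (dedupF xs).filter (· ≠ x)

theorem mem_dedupF_iff : ∀ (l : List Int) (c : Int), c ∈ dedupF l ↔ c ∈ l := by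
  intro l
  induction l with
  | nil => intro c; simp [dedupF]
  | cons x xs ih =>
    intro c
    by_cases hcx : c = x
    · simp [dedupF, hcx]
    · simp [dedupF, hcx, List.mem_filter, ih c]

theorem nodup_dedupF : ∀ (l : List Int), (dedupF l).Nodup := by
  intro l
  induction l with
  | nil => simp [dedupF]
  | cons x xs ih =>
    rw [dedupF]
    refine List.nodup_cons.mpr ⟨fun hmem => ?_, List.Nodup.filter _ ih⟩
    have := List.of_mem_filter hmem
    simp at this

-- dedupF commutes with filtering away one value
theorem dedupF_filter_ne (p : Int) : ∀ (l : List Int),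
    dedupF (l.filter (· ≠ p)) = (dedupF l).filter (· ≠ p) := by
  intro l
  induction l with
  | nil => simp [dedupF]
  | cons x xs ih =>
    by_cases hxp : x = p
    · subst hxp
      rw [List.filter_cons_of_neg (by simp), ih, dedupF,
        List.filter_cons_of_neg (by simp)]
      rw [List.filter_filter]
      apply List.filter_congr
      intro a _
      by_cases hax : a = x <;> simp [hax]
    · rw [List.filter_cons_of_pos (by simpa using hxp), dedupF, dedupF, ih,
        List.filter_cons_of_pos (by simpa using hxp)]
      congr 1
      rw [List.filter_filter, List.filter_filter]
      apply List.filter_congr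
      intro a _
      by_cases hax : a = x <;> by_cases hap : a = p <;> simp [hax, hap]

-- the scan's loop body (definitionally the lambda in get_part_sizes_alt)
def scanStep (st : List Int × Int × Option Int) (c : Int) : List Int × Int × Option Int :=
  if 0 < st.2.1 ∧ st.2.2 = some c then (st.1, st.2.1 + 1, st.2.2)
  else ((if 0 < st.2.1 then st.1 ++ [st.2.1] else st.1), 1, some c)

theorem scan_mid : ∀ (l : List Int) (sizes : List Int) (k p : Int), 0 < k →
    (let st := l.foldl scanStep (sizes, k, some p)
     if 0 < st.2.1 then st.1 ++ [st.2.1] else st.1) = sizes ++ contRuns p k l := by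
  intro l
  induction l with
  | nil => intro sizes k p hk; simp [contRuns, hk]
  | cons x xs ih =>
    intro sizes k p hk
    by_cases hxp : x = p
    · subst hxp
      simp only [List.foldl_cons, scanStep, hk, true_and, contRuns]
      exact ih sizes (k + 1) x (by omega)
    · have hpx : p ≠ x := fun h => hxp h.symm
      simp only [List.foldl_cons, scanStep, hk, true_and, Option.some.injEq, hpx,
        if_false, if_true, contRuns, if_neg hxp]
      rw [ih (sizes ++ [k]) 1 x (by omega), List.append_assoc]
      rfl

theorem scan_top_nil :
    (let st := ([] : List Int).foldl scanStep ([], 0, none)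
     if 0 < st.2.1 then st.1 ++ [st.2.1] else st.1) = [] := by simp

theorem scan_top_cons (x : Int) (xs : List Int) :
    (let st := (x :: xs).foldl scanStep ([], 0, none)
     if 0 < st.2.1 then st.1 ++ [st.2.1] else st.1) = contRuns x 1 xs := by
  have h0 : scanStep ([], 0, none) x = ([], 1, some x) := by simp [scanStep]
  simp only [List.foldl_cons, h0]
  exact scan_mid xs [] 1 x (by omega)

-- the run lengths of a sorted list are the counts of its distinct values
theorem contRuns_eq_counts : ∀ (l : List Int), l.Pairwise (· ≤ ·) → ∀ (p k : Int),
    (∀ y ∈ l, p ≤ y) →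
    contRuns p k l = (k + (l.count p : Int)) ::
      (dedupF (l.filter (· ≠ p))).map (fun c => (l.count c : Int)) := by
  intro l
  induction l with
  | nil => intro _ p k _; simp [contRuns, dedupF]
  | cons x xs ih =>
    intro hpw p k hle
    have hxs : xs.Pairwise (· ≤ ·) := (List.pairwise_cons.mp hpw).2
    have hxle : ∀ y ∈ xs, x ≤ y := (List.pairwise_cons.mp hpw).1
    by_cases hxp : x = p
    · subst hxp
      rw [contRuns, if_pos rfl, ih hxs x (k + 1) hxle]
      have hfil : (x :: xs).filter (· ≠ x) = xs.filter (· ≠ x) := by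
        simp
      rw [hfil]
      congr 1
      · simp; omega
      · apply List.map_congr_left
        intro c hc
        have hcx : ¬ x = c := by
          have := List.of_mem_filter ((mem_dedupF_iff _ c).mp hc)
          simp at this; omega
        simp [hcx]
    · have hpx : p < x := lt_of_le_of_ne (hle x (by simp)) (fun h => hxp h.symm)
      have hnot : ∀ y ∈ x :: xs, y ≠ p := by
        intro y hmem
        rcases List.mem_cons.mp hmem with h | h
        · omega
        · have := hxle y h; omega
      rw [contRuns, if_neg hxp, ih hxs x 1 hxle]
      have hcnt0 : (x :: xs).count p = 0 := by
        rw [List.count_eq_zero]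
        intro h; exact hnot p h rfl
      have hfil : (x :: xs).filter (· ≠ p) = x :: xs := by
        apply List.filter_eq_self.mpr
        intro a ha; simpa using hnot a ha
      rw [hcnt0, hfil, dedupF, dedupF_filter_ne]
      simp only [Int.natCast_zero, add_zero, List.map_cons]
      congr 1
      congr 1
      · simp; omega
      · apply List.map_congr_left
        intro c hc
        have hcx : ¬ x = c := by
          have := List.of_mem_filter hc
          simp at this; omega
        simp [hcx]

-- the whole pipeline agrees on any fetched value list
theorem main_vals (vals : List Int) :
    PySem.List.sorted ((PySem.Set.ofList vals).map (fun k => (vals.count k : Int))) (fun x => x) false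
    = PySem.List.sorted
        (let st := (PySem.List.sorted vals (fun x => x) false).foldl scanStep ([], 0, none)
         if 0 < st.2.1 then st.1 ++ [st.2.1] else st.1) (fun x => x) false := by
  set s := PySem.List.sorted vals (fun x => x) false with hs
  cases hsc : s with
  | nil =>
    have hv : vals = [] := by
      have := PySem.List.sorted_eq_nil_iff (xs := vals) (key := fun x => x) (rev := false)
      rw [← hs, hsc] at this; exact this.mp rfl
    rw [scan_top_nil]
    simp [hv, PySem.Set.ofList]
  | cons x xs =>
    rw [scan_top_cons]
    have hpw : (x :: xs).Pairwise (· ≤ ·) := by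
      rw [← hsc, hs]
      exact PySem.List.sorted_pairwise vals (fun x => x)
    have hxs : xs.Pairwise (· ≤ ·) := (List.pairwise_cons.mp hpw).2
    have hxle : ∀ y ∈ xs, x ≤ y := (List.pairwise_cons.mp hpw).1
    rw [contRuns_eq_counts xs hxs x 1 hxle]
    have hperm : s.Perm vals := PySem.List.sorted_perm vals (fun x => x) false
    have hcount : ∀ c, s.count c = vals.count c := fun c => hperm.count_eq c
    have hbody : (1 + (xs.count x : Int)) ::
        (dedupF (xs.filter (· ≠ x))).map (fun c => (xs.count c : Int))
        = (dedupF s).map (fun c => (vals.count c : Int)) := by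
      rw [hsc, dedupF, dedupF_filter_ne]
      simp only [List.map_cons]
      congr 1
      · rw [← hcount x, hsc]; simp; omega
      · apply List.map_congr_left
        intro c hc
        have hcx : ¬ x = c := by
          have := List.of_mem_filter hc
          simp at this; omega
        rw [← hcount c, hsc]
        simp [hcx]
    rw [hbody]
    apply (PySem.List.sorted_id_eq_sorted_id_iff_perm _ _).mpr
    apply List.Perm.map
    apply (List.perm_ext_iff_of_nodup (PySem.Set.nodup_ofList vals) (nodup_dedupF s)).mpr
    intro a
    rw [PySem.Set.mem_ofList, mem_dedupF_iff, hs, PySem.List.mem_sorted]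

-- ===== VERDICT (by name: the statement is the Claim_ definition above) =====
theorem get_part_sizes_spec : Claim_equal_get_part_sizes := by
  intro graph_idx colors offsets graph_sizes _ hpre
  obtain ⟨hso, hsg, hbound⟩ := hpre
  obtain ⟨base, hbase⟩ := Option.isSome_iff_exists.mp hso
  obtain ⟨size, hsize⟩ := Option.isSome_iff_exists.mp hsg
  rw [hbase, hsize] at hbound
  simp only [Option.getD_some] at hbound
  unfold Spec_get_part_sizes get_part_sizes get_part_sizes_alt
  rw [hbase, hsize]
  simp only []
  -- every colors lookup in the loop succeeds
  have hsome : ∀ i ∈ PySem.List.pyRange 0 size 1, (PySem.List.pyGet? colors (base + i)).isSome := by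
    intro i hi
    have hi' := (PySem.List.mem_pyRange_one (a := 0) (b := size) (x := i)).mp hi
    rcases hbound with h | ⟨h1, h2⟩
    · omega
    · cases hcase : PySem.List.pyGet? colors (base + i) with
      | some _ => simp
      | none =>
        have := (PySem.List.pyGet?_eq_none_iff colors (base + i)).mp hcase
        unfold PySem.Raise.InRange at this
        omega
  by_cases hz : size = 0
  · subst hz
    simp [PySem.List.pyRange_one_eq_nil (by omega : (0:Int) ≤ 0), PySem.List.sorted]
  · rw [if_neg hz]
    -- A side: the fold is the counter of the fetched values
    set vals := (PySem.List.pyRange 0 size 1).filterMap (fun i => PySem.List.pyGet? colors (base + i)) with hv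
    rw [foldl_match_eq_filterMap _ _ _ hsome]
    have hstep : (fun (d : PySem.Dict Int Int) (color : Int) =>
        (let d' := if d.contains color then d else d.insert color (0 : Int)
         d'.insert color (d'.getD color 0 + 1)))
        = fun d color => d.insert color (d.getD color 0 + 1) := by
      funext d color; exact stepA_eq d color
    rw [hstep, PySem.Dict.foldl_insert_getD_add_one_eq_counter]
    have hvalues : (PySem.Dict.counter vals).values
        = (PySem.Set.ofList vals).map (fun k => (vals.count k : Int)) := by
      show ((PySem.Dict.counter vals).items).map (·.2) = _
      rw [PySem.Dict.items_counter]
      simp [List.map_map, Function.comp]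
    rw [hvalues]
    exact main_vals vals
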